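-- pv_equiv track=rewrite | github.com/sminix/skill-challenges | word_funnel1.py | word_funnel1
-- ===== SOURCE A (Python) =====
-- def word_funnel1 (str1, str2):
--
--     if len(str2) > len(str1): #failure check, if str2 is longer is will always fail
--         return False
--
--     for i in range(len(str1)): #for every letter in str1
--
--         new_str1 = str1[0:i] + str1[i+1:] #make a new string removing one letter at a time
--         if new_str1 == str2: #if they are equal it is true
--             return True
--
--     return False #if after going though all the letter it isn't true, return false
-- ===== SOURCE B (Python) =====
-- def word_funnel1(str1, str2):
--     # two-pointer single pass: length gate, skip first mismatch, compare tails
--     if len(str2) != len(str1) - 1: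
--         return False
--     i = 0
--     while i < len(str2) and str1[i] == str2[i]:
--         i += 1
--     return str1[i+1:] == str2[i:]
-- ===== Notes on version B (the rewrite author's own statement) =====
-- stated objective: faster
-- what changed: Replaced A's try-every-deletion loop (rebuilds and compares a candidate string for each index) with an O(n) two-pointer scan: length gate, advance to the first mismatch, compare the remaining tails once.
import Mathlib
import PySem

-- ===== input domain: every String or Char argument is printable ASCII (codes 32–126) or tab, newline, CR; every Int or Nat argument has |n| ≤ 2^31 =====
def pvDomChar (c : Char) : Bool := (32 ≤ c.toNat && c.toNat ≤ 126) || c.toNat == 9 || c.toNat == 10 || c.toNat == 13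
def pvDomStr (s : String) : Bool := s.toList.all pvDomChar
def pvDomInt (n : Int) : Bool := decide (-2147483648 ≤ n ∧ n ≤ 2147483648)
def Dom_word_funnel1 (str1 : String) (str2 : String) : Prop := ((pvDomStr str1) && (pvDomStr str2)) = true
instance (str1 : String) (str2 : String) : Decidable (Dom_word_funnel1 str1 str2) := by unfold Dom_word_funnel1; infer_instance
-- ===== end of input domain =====

-- B is a two-pointer single pass (length gate, skip the first mismatch, compare tails),
-- replacing A's quadratic try-every-deletion loop.

-- ===== PORT A =====
-- literal transliteration of A: length guard, then for each i build str1[0:i]+str1[i+1:] and compare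
def word_funnel1 (str1 : String) (str2 : String) : Bool :=
  if PySem.Str.len str2 > PySem.Str.len str1 then false
  else
    (PySem.List.pyRange 0 (PySem.Str.len str1) 1).any (fun i =>
      (PySem.List.slice str1.toList (some 0) (some i) ++
       PySem.List.slice str1.toList (some (i + 1)) none) == str2.toList)

-- ===== PORT B =====
-- the while loop of B ('advance while chars agree') as structural recursion on both lists;
-- on mismatch (or when str2 is exhausted) it performs B's final 'str1[i+1:] == str2[i:]' check
def pvTwoPtr : List Char → List Char → Bool
  | a :: as, b :: bs => if a == b then pvTwoPtr as bs else as == b :: bs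
  | _ :: as, [] => as == ([] : List Char)
  | [], _ => false   -- unreachable under B's length gate (len str1 = len str2 + 1 > 0)

def word_funnel1_alt (str1 : String) (str2 : String) : Bool :=
  if PySem.Str.len str2 ≠ PySem.Str.len str1 - 1 then false
  else pvTwoPtr str1.toList str2.toList

-- ===== PRECONDITION & SPEC =====
def Spec_word_funnel1 (str1 : String) (str2 : String) (out : Bool) : Prop := out = word_funnel1_alt str1 str2
instance (str1 : String) (str2 : String) (out : Bool) : Decidable (Spec_word_funnel1 str1 str2 out) := by unfold Spec_word_funnel1; infer_instance

-- ===== CLAIM (what is proved, stated in full; the proofs are below) =====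
def Claim_equal_word_funnel1 : Prop := ∀ (str1 : String) (str2 : String), Dom_word_funnel1 str1 str2 → Spec_word_funnel1 str1 str2 (word_funnel1 str1 str2)

-- ===== LEMMAS AND PROOFS =====

-- A's loop body over List.range, abbreviated: "deleting position i from l1 gives l2"
def pvDelEq (l1 l2 : List Char) (i : Nat) : Bool := (l1.take i ++ l1.drop (i + 1)) == l2

-- if the lengths do not fit (len l1 ≠ len l2 + 1), no deletion candidate can equal l2
lemma pvAny_false_of_len (l1 l2 : List Char) (h : l1.length ≠ l2.length + 1) :
    (List.range l1.length).any (pvDelEq l1 l2) = false := by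
  rw [List.any_eq_false]
  intro i hi
  simp only [List.mem_range] at hi
  simp only [pvDelEq, beq_iff_eq]
  intro heq
  apply h
  have := congrArg List.length heq
  simp [List.length_take, List.length_drop] at this
  omega

-- main invariant: when the lengths fit, A's try-every-deletion any equals B's two-pointer scan
lemma pvAny_eq_twoPtr (l1 l2 : List Char) (h : l1.length = l2.length + 1) :
    (List.range l1.length).any (pvDelEq l1 l2) = pvTwoPtr l1 l2 := by
  induction l1 generalizing l2 with
  | nil => simp at h
  | cons a as ih =>
    cases l2 with
    | nil =>
      have has : as = [] := by
        have := h; simpa using this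
      subst has
      simp [pvDelEq, pvTwoPtr]
    | cons b bs =>
      have hlen : as.length = bs.length + 1 := by simp at h; omega
      rw [show (a :: as).length = as.length + 1 from rfl, List.range_succ_eq_map,
        List.any_cons, List.any_map]
      have h0 : pvDelEq (a :: as) (b :: bs) 0 = (as == b :: bs) := by
        simp [pvDelEq]
      by_cases hab : a = b
      · subst hab
        have hbody : ∀ i, (pvDelEq (a :: as) (a :: bs) ∘ Nat.succ) i = pvDelEq as bs i := by
          intro i
          simp [pvDelEq, Function.comp, List.take_succ_cons, List.drop_succ_cons]
        rw [h0, List.any_congr rfl hbody, ih bs hlen]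
        show ((as == a :: bs) || pvTwoPtr as bs) = pvTwoPtr (a :: as) (a :: bs)
        simp only [pvTwoPtr, beq_self_eq_true, if_true]
        by_cases hcase : as = a :: bs
        · -- then deleting position 0 of as gives bs, so the scan succeeds too
          have : pvTwoPtr as bs = true := by
            rw [← ih bs hlen, List.any_eq_true]
            exact ⟨0, List.mem_range.mpr (by omega), by simp [pvDelEq, hcase]⟩
          simp [this]
        · simp [hcase]
      · -- first characters differ: every candidate i+1 keeps a, so only i = 0 can work
        have hbody : ∀ i, (pvDelEq (a :: as) (b :: bs) ∘ Nat.succ) i = false := by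
          intro i
          simp [pvDelEq, Function.comp, List.take_succ_cons, List.drop_succ_cons, hab]
        rw [h0, List.any_congr rfl hbody]
        simp [pvTwoPtr, hab]

-- A's loop, with PySem range/slices rewritten to List.range / take / drop
lemma pvA_loop (l1 l2 : List Char) :
    ((PySem.List.pyRange 0 (l1.length : Int) 1).any (fun i =>
      (PySem.List.slice l1 (some 0) (some i) ++
       PySem.List.slice l1 (some (i + 1)) none) == l2))
    = (List.range l1.length).any (pvDelEq l1 l2) := by
  rw [PySem.List.pyRange_zero_natCast, List.any_map]
  apply List.any_congr rfl
  intro k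
  simp only [Function.comp, pvDelEq]
  rw [PySem.List.slice_zero_start, PySem.List.slice_to_natCast,
    show ((k : Int) + 1) = ((k + 1 : Nat) : Int) by push_cast; ring,
    PySem.List.slice_from_natCast]

-- ===== VERDICT (by name: the statement is the Claim_ definition above) =====
theorem word_funnel1_spec : Claim_equal_word_funnel1 := by
  intro str1 str2 _
  unfold Spec_word_funnel1 word_funnel1 word_funnel1_alt
  rw [PySem.Str.len_eq, PySem.Str.len_eq]
  set l1 := str1.toList
  set l2 := str2.toList
  by_cases hgt : (l2.length : Int) > (l1.length : Int)
  · rw [if_pos hgt, if_pos (by omega)]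
  · rw [if_neg hgt, pvA_loop l1 l2]
    by_cases hfit : l1.length = l2.length + 1
    · rw [if_neg (by omega), pvAny_eq_twoPtr l1 l2 hfit]
    · rw [if_pos (by omega), pvAny_false_of_len l1 l2 hfit]
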